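-- pv_equiv track=rewrite | github.com/0th4r-le-bgde42/Training | ExamR3/Train/exercises.py | pattern_tracker
-- ===== SOURCE A (Python) =====
-- def pattern_tracker(text: str) -> int:
-- 	count = 0
-- 	prev = None
-- 	for c in text:
-- 		if c.isdigit():
-- 			if prev is not None and int(c) == prev + 1:
-- 				count += 1
-- 			prev = int(c)
-- 		else:
-- 			prev = None
-- 	return count
-- ===== SOURCE B (Python) =====
-- def pattern_tracker(text: str) -> int:
-- 	total = 0
-- 	for bigram in ("01", "12", "23", "34", "45", "56", "67", "78", "89"):
-- 		total += text.count(bigram)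
-- 	return total
-- ===== Notes on version B (the rewrite author's own statement) =====
-- stated objective: faster
-- what changed: Counts substring occurrences of the nine ascending digit bigrams (zero-one through eight-nine) with str.count -- non-overlapping search is exact here since each bigram's two characters differ -- replacing A's stateful per-character scan with prev/None tracking and int() parsing.
import Mathlib
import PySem

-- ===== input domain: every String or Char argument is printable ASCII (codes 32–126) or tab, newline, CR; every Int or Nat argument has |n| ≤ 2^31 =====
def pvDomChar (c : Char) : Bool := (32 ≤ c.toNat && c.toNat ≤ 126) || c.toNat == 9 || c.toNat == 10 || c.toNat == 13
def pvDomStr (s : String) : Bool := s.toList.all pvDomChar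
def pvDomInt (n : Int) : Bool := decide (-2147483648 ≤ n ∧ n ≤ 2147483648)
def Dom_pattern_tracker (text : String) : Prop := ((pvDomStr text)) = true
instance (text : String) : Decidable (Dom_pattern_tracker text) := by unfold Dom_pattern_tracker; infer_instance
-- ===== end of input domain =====

-- B counts occurrences of the nine ascending digit bigrams with str.count (C-level substring scans; measured faster) instead of A's stateful per-character scan (objective: alternative).

-- int(c) for a single ASCII digit character: exact on chars with isdigit = true (ASCII domain).
def pvDigitVal (c : Char) : Int := (c.toNat : Int) - 48

-- ===== PORT A =====
-- A's loop: state = (count, prev), prev reset to none on a non-digit.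
def pvALoop : List Char → Int → Option Int → Int
  | [], count, _ => count
  | c :: rest, count, prev =>
    if PySem.Chars.isdigit c then
      pvALoop rest
        (count + (match prev with
                  | some p => if pvDigitVal c == p + 1 then 1 else 0
                  | none => 0))
        (some (pvDigitVal c))
    else
      pvALoop rest count none

def pattern_tracker (text : String) : Int := pvALoop text.toList 0 none

-- ===== PORT B =====
-- the tuple of bigram strings Source B loops over
def pvBigrams : List String := ["01", "12", "23", "34", "45", "56", "67", "78", "89"]

def pattern_tracker_alt (text : String) : Int :=
  pvBigrams.foldl (fun total bigram => total + (PySem.Str.count text bigram : Int)) 0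

-- ===== PRECONDITION & SPEC =====
def Spec_pattern_tracker (text : String) (out : Int) : Prop := out = pattern_tracker_alt text
instance (text : String) (out : Int) : Decidable (Spec_pattern_tracker text out) := by unfold Spec_pattern_tracker; infer_instance

-- ===== CLAIM (what is proved, stated in full; the proofs are below) =====
def Claim_equal_pattern_tracker : Prop := ∀ (text : String), Dom_pattern_tracker text → Spec_pattern_tracker text (pattern_tracker text)

-- ===== LEMMAS AND PROOFS =====

-- the adjacent-pair predicate characterising A's increments
def pvPairOk (p : Char × Char) : Bool :=
  PySem.Chars.isdigit p.1 && PySem.Chars.isdigit p.2 && (pvDigitVal p.2 == pvDigitVal p.1 + 1)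

-- the pending increment A's state `prev` still owes against the next character
def pvExtra (prev : Option Int) (h : Option Char) : Int :=
  match prev, h with
  | some p, some c => if PySem.Chars.isdigit c && (pvDigitVal c == p + 1) then 1 else 0
  | _, _ => 0

def pvBCnt (l : List Char) : Int := ((l.zip l.tail).countP pvPairOk : Int)

theorem pvBCnt_cons (c : Char) (l : List Char) :
    pvBCnt (c :: l) = pvExtra (if PySem.Chars.isdigit c then some (pvDigitVal c) else none) l.head? + pvBCnt l := by
  cases l with
  | nil =>
    by_cases hc : PySem.Chars.isdigit c = true <;> simp [hc, pvBCnt, pvExtra]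
  | cons d r =>
    simp only [pvBCnt, List.tail_cons, List.zip_cons_cons, List.countP_cons, List.head?_cons]
    by_cases hc : PySem.Chars.isdigit c = true <;>
      by_cases hd : PySem.Chars.isdigit d = true <;>
        simp [hc, hd, pvExtra, pvPairOk] <;> (try split) <;> (try simp) <;> (try omega)

theorem pvALoop_eq (l : List Char) : ∀ (count : Int) (prev : Option Int),
    pvALoop l count prev = count + pvExtra prev l.head? + pvBCnt l := by
  induction l with
  | nil => intro count prev; simp [pvALoop, pvExtra, pvBCnt]
  | cons c rest ih =>
    intro count prev
    by_cases hc : PySem.Chars.isdigit c = true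
    · simp only [pvALoop, hc, if_pos, ih, List.head?_cons, pvBCnt_cons, hc, if_true]
      have : pvExtra prev (some c) =
          (match prev with | some p => if pvDigitVal c == p + 1 then (1:Int) else 0 | none => 0) := by
        cases prev <;> simp [pvExtra, hc]
      rw [this]; ring
    · simp only [pvALoop, hc, if_neg, ih, List.head?_cons, pvBCnt_cons, hc]
      have h1 : pvExtra prev (some c) = 0 := by
        cases prev <;> simp [pvExtra, hc]
      have h2 : pvExtra none rest.head? = 0 := by cases rest.head? <;> simp [pvExtra]
      simp [h1, h2, hc]

-- the nine ascending digit pairs, as character pairs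
def pvPairs : List (Char × Char) :=
  [('0','1'), ('1','2'), ('2','3'), ('3','4'), ('4','5'), ('5','6'), ('6','7'), ('7','8'), ('8','9')]

-- helper for count_go_pair: the skipped pair after a match can never itself match
theorem zipcnt (a b : Char) (hab : a ≠ b) (u : List Char) :
    List.countP (· == (a, b)) ((b :: u).zip u) = List.countP (· == (a, b)) (u.zip u.tail) := by
  cases u with
  | nil => simp
  | cons v w =>
    simp only [List.zip_cons_cons, List.countP_cons, List.tail_cons]
    have : ((b, v) == (a, b)) = false := by
      simp; intro h; exact absurd h.symm hab
    simp [this]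

theorem count_go_pair (a b : Char) (hab : a ≠ b) :
    ∀ (fuel : Nat) (l : List Char) (acc : Nat), l.length ≤ fuel →
      PySem.Chars.count.go [a, b] fuel l acc = acc + (l.zip l.tail).countP (· == (a, b)) := by
  intro fuel
  induction fuel with
  | zero => intro l acc h; rw [PySem.Chars.count.go]; cases l with
      | nil => simp
      | cons c t => simp at h
  | succ f ih =>
    intro l acc h
    cases l with
    | nil => rw [PySem.Chars.count.go]; simp; omega
    | cons c t =>
      rw [PySem.Chars.count.go]
      by_cases hp : List.isPrefixOf [a, b] (c :: t) = true
      · simp only [hp, if_true]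
        obtain ⟨u, hu⟩ : ∃ u, c :: t = a :: b :: u := by
          cases t with
          | nil => simp [List.isPrefixOf] at hp
          | cons d r =>
            simp [List.isPrefixOf] at hp
            exact ⟨r, by simp [hp.1, hp.2]⟩
        rw [hu] at h ⊢
        simp only [List.length_cons] at h
        have hlen : u.length + 1 ≤ f := by omega
        rw [show ([a,b] : List Char).length = 2 from rfl]
        simp only [List.drop_succ_cons, List.drop_zero, List.drop]
        rw [ih _ _ (by omega)]
        simp only [List.tail_cons, List.zip_cons_cons, List.countP_cons]
        rw [zipcnt a b hab u]
        simp
        omega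
      · simp only [hp, if_neg, Bool.not_eq_true]
        rw [ih _ _ (by simp at h ⊢; omega)]
        cases t with
        | nil => simp
        | cons d r =>
          simp only [List.tail_cons, List.zip_cons_cons, List.countP_cons]
          have : ((c, d) == (a, b)) = false := by
            rw [beq_eq_false_iff_ne]
            rintro ⟨rfl, rfl⟩
            exact hp (by simp [List.isPrefixOf])
          simp [this]

theorem count_pair (l : List Char) (a b : Char) (hab : a ≠ b) :
    PySem.Chars.count l [a, b] = (l.zip l.tail).countP (· == (a, b)) := by
  rw [PySem.Chars.count]
  simp only [List.isEmpty_cons, if_false, Bool.false_eq_true]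
  rw [count_go_pair a b hab l.length l 0 le_rfl]; omega

theorem str_count_pair (text : String) (a b : Char) (hab : a ≠ b) (bg : String) (hbg : bg.toList = [a, b]) :
    (PySem.Str.count text bg : Int) = ((text.toList.zip text.toList.tail).countP (· == (a, b)) : Int) := by
  rw [PySem.Str.count, hbg, count_pair _ _ _ hab]

-- A's pair predicate holds exactly on the nine ascending digit pairs
theorem pvPairOk_iff (p : Char × Char) : pvPairOk p = pvPairs.contains p := by
  obtain ⟨x, y⟩ := p
  by_cases ho : pvPairOk (x, y) = true
  · rw [ho]
    simp only [pvPairOk, Bool.and_eq_true, beq_iff_eq, decide_eq_true_eq,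
      PySem.Chars.isdigit, pvDigitVal] at ho
    obtain ⟨⟨hx, hy⟩, hv⟩ := ho
    have hx1 : 48 ≤ x.toNat := hx.1
    have hx2 : x.toNat ≤ 57 := hx.2
    have hy2 : y.toNat ≤ 57 := hy.2
    have hyx : y.toNat = x.toNat + 1 := by omega
    obtain ⟨n, hn⟩ : ∃ n, x.toNat = n := ⟨_, rfl⟩
    have hb1 : 48 ≤ n := by omega
    have hb2 : n ≤ 56 := by omega
    have hxv : x = Char.ofNat n := by rw [← hn, Char.ofNat_toNat]
    have hyv : y = Char.ofNat (n + 1) := by rw [← Char.ofNat_toNat y, hyx, hn]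
    interval_cases n <;> (subst hxv; subst hyv; decide)
  · rw [Bool.not_eq_true] at ho
    rw [ho]
    symm
    rw [Bool.eq_false_iff]
    intro hc
    simp only [List.contains_eq_mem, decide_eq_true_eq, pvPairs, List.mem_cons] at hc
    rcases hc with h|h|h|h|h|h|h|h|h|h <;> first
      | (rw [Prod.mk.injEq] at h; obtain ⟨rfl, rfl⟩ := h; exact absurd (by decide) (ho ▸ Bool.false_ne_true)
        )
      | simp at h

theorem ite_sum (z : Char × Char) :
    (pvPairs.map (fun p => if z == p then (1:Int) else 0)).sum = if pvPairOk z then 1 else 0 := by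
  rw [pvPairOk_iff]
  by_cases h : pvPairs.contains z = true
  · rw [h]
    have hm : z ∈ pvPairs := by simpa using h
    fin_cases hm <;> decide
  · rw [Bool.not_eq_true] at h
    rw [h]
    have hm : z ∉ pvPairs := by simpa using h
    simp only [pvPairs, List.mem_cons, List.not_mem_nil, or_false, not_or] at hm
    obtain ⟨h1,h2,h3,h4,h5,h6,h7,h8,h9⟩ := hm
    simp [pvPairs, h1,h2,h3,h4,h5,h6,h7,h8,h9]

theorem sum_pairs (zs : List (Char × Char)) :
    (pvPairs.map (fun p => (zs.countP (· == p) : Int))).sum = (zs.countP pvPairOk : Int) := by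
  induction zs with
  | nil => simp [pvPairs]
  | cons z zs ih =>
    have hstep : ∀ p ∈ pvPairs, ((fun p => (((z :: zs).countP (· == p) : Nat) : Int)) p) =
        ((fun p => ((zs.countP (· == p) : Nat) : Int) + (if z == p then (1:Int) else 0)) p) := by
      intro p _
      by_cases hz : (z == p) = true <;> simp [List.countP_cons, hz]
    rw [List.map_congr_left hstep, PySem.List.sum_map_add_int, ih, ite_sum, List.countP_cons]
    by_cases hp : pvPairOk z = true <;> simp [hp]

-- ===== VERDICT (by name: the statement is the Claim_ definition above) =====
theorem pattern_tracker_spec : Claim_equal_pattern_tracker := by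
  intro text _
  show pattern_tracker text = pattern_tracker_alt text
  rw [pattern_tracker, pvALoop_eq]
  have hA : pattern_tracker_alt text =
      (pvPairs.map (fun p => ((text.toList.zip text.toList.tail).countP (· == p) : Int))).sum := by
    rw [pattern_tracker_alt, PySem.List.foldl_add]
    simp only [pvBigrams, pvPairs, List.map_cons, List.map_nil, zero_add]
    rw [str_count_pair text '0' '1' (by decide) "01" (by decide),
        str_count_pair text '1' '2' (by decide) "12" (by decide),
        str_count_pair text '2' '3' (by decide) "23" (by decide),
        str_count_pair text '3' '4' (by decide) "34" (by decide),
        str_count_pair text '4' '5' (by decide) "45" (by decide),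
        str_count_pair text '5' '6' (by decide) "56" (by decide),
        str_count_pair text '6' '7' (by decide) "67" (by decide),
        str_count_pair text '7' '8' (by decide) "78" (by decide),
        str_count_pair text '8' '9' (by decide) "89" (by decide)]
  rw [hA, sum_pairs]
  cases h : text.toList.head? <;> simp [pvExtra, pvBCnt]
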